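-- pv_equiv track=rewrite | github.com/atticuskramer/advent-of-code | 2015/aoc_day_8.py | encoded_chars
-- ===== SOURCE A (Python) =====
-- def encoded_chars(string):
--     """Return the number of characters in the encoded string
--
--     e.g. the string "ab\"c" would encode to "\"ab\\\"c\"",
--     so this function would return 13"""
--     characters_needing_encoding = {'\\', '"'}
--     length = 2
--     for char in string:
--         length += 1
--         if char in characters_needing_encoding:
--             length += 1
--     return length
-- ===== SOURCE B (Python) =====
-- def encoded_chars(string):
--     """Return the number of characters in the encoded string"""
--     return len(string) + 2 + string.count('\\') + string.count('"')
-- ===== Notes on version B (the rewrite author's own statement) =====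
-- stated objective: idiomatic
-- what changed: Replaced the per-character accumulating loop with a direct arithmetic expression: the length plus 2 plus the counts of backslash and double-quote characters obtained via str.count.
import Mathlib
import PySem

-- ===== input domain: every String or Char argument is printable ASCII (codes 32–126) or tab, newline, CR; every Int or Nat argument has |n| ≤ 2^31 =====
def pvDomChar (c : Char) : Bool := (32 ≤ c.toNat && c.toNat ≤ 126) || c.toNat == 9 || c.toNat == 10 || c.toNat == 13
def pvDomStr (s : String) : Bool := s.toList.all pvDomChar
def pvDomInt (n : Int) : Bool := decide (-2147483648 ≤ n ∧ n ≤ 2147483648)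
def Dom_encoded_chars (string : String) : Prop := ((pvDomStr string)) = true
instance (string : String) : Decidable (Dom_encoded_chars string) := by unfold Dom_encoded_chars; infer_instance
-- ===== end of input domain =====

-- B replaces A's accumulating per-character loop by the arithmetic expression
-- len(string) + 2 + string.count('\\') + string.count('"') (idiomatic, same cost).

-- ===== PORT A =====
def encoded_chars (string : String) : Int :=
  let characters_needing_encoding : PySem.Set Char := PySem.Set.ofList ['\\', '"']
  string.toList.foldl
    (fun length char =>
      let length := length + 1
      if PySem.Set.contains characters_needing_encoding char then length + 1 else length)
    2

-- ===== PORT B =====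
def encoded_chars_alt (string : String) : Int :=
  PySem.Str.len string + 2 + (PySem.Str.count string "\\" : Int) + (PySem.Str.count string "\"" : Int)

-- ===== PRECONDITION & SPEC =====
def Spec_encoded_chars (string : String) (out : Int) : Prop := out = encoded_chars_alt string
instance (string : String) (out : Int) : Decidable (Spec_encoded_chars string out) := by unfold Spec_encoded_chars; infer_instance

-- ===== CLAIM (what is proved, stated in full; the proofs are below) =====
def Claim_equal_encoded_chars : Prop := ∀ (string : String), Dom_encoded_chars string → Spec_encoded_chars string (encoded_chars string)

-- ===== LEMMAS AND PROOFS =====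

theorem pv_go_singleton (c : Char) : ∀ (l : List Char) (fuel acc : Nat), l.length ≤ fuel →
    PySem.Chars.count.go [c] fuel l acc = acc + l.count c := by
  intro l
  induction l with
  | nil => intro fuel acc h; cases fuel <;> simp [PySem.Chars.count.go]
  | cons x t ih =>
    intro fuel acc h
    cases fuel with
    | zero => simp at h
    | succ n =>
      simp only [PySem.Chars.count.go]
      by_cases hx : x = c
      · subst hx
        simp [List.isPrefixOf, ih n (acc+1) (by simpa using h)]
        omega
      · simp [List.isPrefixOf, hx, ih n acc (by simpa using h), Ne.symm hx]

theorem pv_count_singleton (cs : List Char) (c : Char) :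
    PySem.Chars.count cs [c] = cs.count c := by
  simp [PySem.Chars.count, pv_go_singleton c cs cs.length 0 le_rfl]

theorem pv_foldl_encode (l : List Char) (a : Int) :
    l.foldl
      (fun length char =>
        let length := length + 1
        if PySem.Set.contains (PySem.Set.ofList ['\\', '"']) char then length + 1 else length)
      a
    = a + l.length + l.count '\\' + l.count '"' := by
  induction l generalizing a with
  | nil => simp
  | cons x t ih =>
    simp only [List.foldl_cons, ih, List.length_cons, List.count_cons]
    by_cases h1 : x = '\\'
    · subst h1; simp [PySem.Set.contains, PySem.Set.ofList]; ring
    · by_cases h2 : x = '"'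
      · subst h2; simp [PySem.Set.contains, PySem.Set.ofList]; ring
      · simp [PySem.Set.contains, PySem.Set.ofList, h1, h2]; ring

-- ===== VERDICT (by name: the statement is the Claim_ definition above) =====
theorem encoded_chars_spec : Claim_equal_encoded_chars := by
  intro s _
  unfold Spec_encoded_chars encoded_chars encoded_chars_alt
  simp only [pv_foldl_encode, PySem.Str.count_eq, PySem.Str.len_eq]
  have h1 := pv_count_singleton s.toList '\\'
  have h2 := pv_count_singleton s.toList '"'
  rw [show ("\\" : String).toList = ['\\'] from rfl, show ("\"" : String).toList = ['"'] from rfl] at *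
  rw [h1, h2]
  ring
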